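-- pv_equiv track=rewrite | github.com/thfnz/Stage-2a | Regression/abs_met_uptake/assistFunct.py | new_bool_repr
-- ===== SOURCE A (Python) =====
-- def new_bool_repr(boolRepr, query):
-- 	# Update the boolean representation of which data is used in training (alProces.class_set[2])
-- 	# Used because of =/= between absolute idx and testing idx.
-- 	# Can (maybe) be optimized by rewriting all the alProcesses to not delete data from X_test/y_test but instead only use boolRepr
--
-- 	nb_false = 0
-- 	for idx in range(len(boolRepr)):
-- 		if not boolRepr[idx]: # Virtually create a sub array containing all False values explored by nb_false
-- 			found = False
-- 			idx_query = 0
-- 			while not found and idx_query < len(query):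
-- 				if nb_false == query[idx_query]: # If the False value is queried
-- 					boolRepr[idx] = True
-- 					found = True
-- 				idx_query += 1
-- 			nb_false += 1
--
-- 	return boolRepr
-- ===== SOURCE B (Python) =====
-- def new_bool_repr(boolRepr, query):
--     # Index table of False positions: false_positions[k] = position of k-th False.
--     false_positions = [i for i, b in enumerate(boolRepr) if not b]
--     n = len(false_positions)
--     for q in query:
--         if 0 <= q < n:
--             boolRepr[false_positions[q]] = True
--     return boolRepr
-- ===== Notes on version B (the rewrite author's own statement) =====
-- stated objective: faster
-- what changed: Builds a one-pass index table of False positions, then iterates over query setting boolRepr[false_positions[q]] directly, instead of scanning query from the start for every False entry.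
import Mathlib
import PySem

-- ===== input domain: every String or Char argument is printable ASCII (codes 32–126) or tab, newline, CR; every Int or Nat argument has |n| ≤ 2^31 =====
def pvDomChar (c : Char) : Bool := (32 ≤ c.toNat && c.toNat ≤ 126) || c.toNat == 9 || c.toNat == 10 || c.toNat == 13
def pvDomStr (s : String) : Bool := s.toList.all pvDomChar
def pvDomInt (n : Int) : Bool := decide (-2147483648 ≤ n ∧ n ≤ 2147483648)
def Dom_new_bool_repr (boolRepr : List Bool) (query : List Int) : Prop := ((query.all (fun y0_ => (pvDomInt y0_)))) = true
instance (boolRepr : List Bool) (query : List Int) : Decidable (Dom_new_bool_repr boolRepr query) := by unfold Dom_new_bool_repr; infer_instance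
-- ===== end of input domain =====

-- B replaces A's per-False-entry scan of query by a one-pass index table of False
-- positions plus a single pass over query (faster; asymptotic O(n+m) vs O(n*m)).
-- Both Pythons mutate boolRepr in place identically and return it; the proof is about the return value.

-- ===== PORT A =====
-- inner 'while not found and idx_query < len(query)' loop: returns whether nb_false was found in query
def pvFindQ (nbf : Int) : List Int → Bool
  | [] => false
  | q :: qs => if nbf = q then true else pvFindQ nbf qs

-- the 'for idx in range(len(boolRepr))' loop, carrying nb_false; entries are rewritten in place order
def pvLoopA (query : List Int) : List Bool → Int → List Bool
  | [], _ => []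
  | b :: bs, nbf =>
    if !b then pvFindQ nbf query :: pvLoopA query bs (nbf + 1)
    else b :: pvLoopA query bs nbf

def new_bool_repr (boolRepr : List Bool) (query : List Int) : List Bool :=
  pvLoopA query boolRepr 0

-- ===== PORT B =====
-- false_positions = [i for i, b in enumerate(boolRepr) if not b]; the enumerate counter is a
-- nonnegative index, kept as Nat (p.1.toNat is exact there); then one pass over query setting entries.
def new_bool_repr_alt (boolRepr : List Bool) (query : List Int) : List Bool :=
  let fp : List Nat := (PySem.List.enumerate boolRepr).filterMap
    (fun p => if p.2 then none else some p.1.toNat)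
  query.foldl
    (fun acc q =>
      if 0 ≤ q ∧ q < (fp.length : Int) then acc.set (fp.getD q.toNat 0) true else acc)
    boolRepr

-- ===== PRECONDITION & SPEC =====
def Spec_new_bool_repr (boolRepr : List Bool) (query : List Int) (out : List Bool) : Prop := out = new_bool_repr_alt boolRepr query
instance (boolRepr : List Bool) (query : List Int) (out : List Bool) : Decidable (Spec_new_bool_repr boolRepr query out) := by unfold Spec_new_bool_repr; infer_instance

-- ===== CLAIM (what is proved, stated in full; the proofs are below) =====
def Claim_equal_new_bool_repr : Prop := ∀ (boolRepr : List Bool) (query : List Int), Dom_new_bool_repr boolRepr query → Spec_new_bool_repr boolRepr query (new_bool_repr boolRepr query)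

-- ===== LEMMAS AND PROOFS =====

-- positions (offset by k) of the False entries of a list; proof-side model of B's index table
def pvGp : List Bool → Nat → List Nat
  | [], _ => []
  | true :: bs, k => pvGp bs (k + 1)
  | false :: bs, k => k :: pvGp bs (k + 1)

theorem pvFp_eq_gp : ∀ (l : List Bool) (k : Nat),
    (PySem.List.enumerate l (k : Int)).filterMap
      (fun p => if p.2 then none else some p.1.toNat) = pvGp l k := by
  intro l
  induction l with
  | nil => intro k; simp [PySem.List.enumerate_nil, pvGp]
  | cons b bs ih =>
    intro k
    cases b <;>
      simp [PySem.List.enumerate_cons, pvGp, List.filterMap_cons] <;>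
      · have : (k : Int) + 1 = ((k + 1 : Nat) : Int) := by push_cast; ring
        rw [this, ih]

theorem pvFindQ_iff : ∀ (nbf : Int) (qs : List Int), pvFindQ nbf qs = true ↔ nbf ∈ qs := by
  intro nbf qs
  induction qs with
  | nil => simp [pvFindQ]
  | cons q qs ih =>
    simp only [pvFindQ, List.mem_cons]
    split_ifs with h
    · simp [h]
    · simp [ih, h]

theorem pvLoopA_getElem? : ∀ (l : List Bool) (query : List Int) (nbf : Int) (i : Nat),
    (pvLoopA query l nbf)[i]? =
      l[i]?.map (fun b => b || pvFindQ (nbf + ((l.take i).count false : Int)) query) := by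
  intro l query
  induction l with
  | nil => intro nbf i; simp [pvLoopA]
  | cons b bs ih =>
    intro nbf i
    cases b <;> cases i <;>
      simp [pvLoopA, ih, List.count_cons] <;> push_cast <;> ring_nf

theorem pvSet_getElem? (a : List Bool) (j i : Nat) :
    (a.set j true)[i]? = if j = i then a[i]?.map (fun _ => true) else a[i]? := by
  by_cases h : j = i
  · subst h
    rw [if_pos rfl, List.getElem?_set, if_pos rfl]
    by_cases hl : j < a.length
    · rw [if_pos hl, List.getElem?_eq_getElem hl]; rfl
    · rw [if_neg hl, List.getElem?_eq_none_iff.mpr (by omega)]; rfl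
  · rw [if_neg h, List.getElem?_set, if_neg h]

theorem pvFold_getElem? : ∀ (qs : List Int) (fp : List Nat) (acc : List Bool) (i : Nat),
    (qs.foldl
      (fun a q => if 0 ≤ q ∧ q < (fp.length : Int) then a.set (fp.getD q.toNat 0) true else a)
      acc)[i]? =
    if (∃ q ∈ qs, 0 ≤ q ∧ q < (fp.length : Int) ∧ fp.getD q.toNat 0 = i)
      then acc[i]?.map (fun _ => true) else acc[i]? := by
  intro qs
  induction qs with
  | nil => intro fp acc i; simp
  | cons q qs ih =>
    intro fp acc i
    rw [List.foldl_cons, ih]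
    have hc : (∃ p ∈ q :: qs, 0 ≤ p ∧ p < (fp.length : Int) ∧ fp.getD p.toNat 0 = i) ↔
        ((0 ≤ q ∧ q < (fp.length : Int) ∧ fp.getD q.toNat 0 = i) ∨
          (∃ p ∈ qs, 0 ≤ p ∧ p < (fp.length : Int) ∧ fp.getD p.toNat 0 = i)) := by
      constructor
      · rintro ⟨p, hp, h⟩
        rcases List.mem_cons.mp hp with rfl | hp'
        · exact Or.inl h
        · exact Or.inr ⟨p, hp', h⟩
      · rintro (h | ⟨p, hp, h⟩)
        · exact ⟨q, List.mem_cons_self, h⟩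
        · exact ⟨p, List.mem_cons_of_mem _ hp, h⟩
    by_cases hv : 0 ≤ q ∧ q < (fp.length : Int)
    · rw [if_pos hv, pvSet_getElem?]
      by_cases hj : fp.getD q.toNat 0 = i
      · have hcons : (∃ p ∈ q :: qs, 0 ≤ p ∧ p < (fp.length : Int) ∧ fp.getD p.toNat 0 = i) :=
          hc.mpr (Or.inl ⟨hv.1, hv.2, hj⟩)
        rw [if_pos hj, if_pos hcons]
        by_cases hq : (∃ p ∈ qs, 0 ≤ p ∧ p < (fp.length : Int) ∧ fp.getD p.toNat 0 = i) <;>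
          [rw [if_pos hq]; rw [if_neg hq]] <;> cases acc[i]? <;> rfl
      · rw [if_neg hj]
        by_cases hq : (∃ p ∈ qs, 0 ≤ p ∧ p < (fp.length : Int) ∧ fp.getD p.toNat 0 = i)
        · rw [if_pos hq, if_pos (hc.mpr (Or.inr hq))]
        · rw [if_neg hq, if_neg (by rw [hc]; exact not_or.mpr ⟨fun h => hj h.2.2, hq⟩)]
    · rw [if_neg hv]
      by_cases hq : (∃ p ∈ qs, 0 ≤ p ∧ p < (fp.length : Int) ∧ fp.getD p.toNat 0 = i)
      · rw [if_pos hq, if_pos (hc.mpr (Or.inr hq))]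
      · rw [if_neg hq, if_neg (by rw [hc]; exact not_or.mpr ⟨fun h => hv ⟨h.1, h.2.1⟩, hq⟩)]

-- the rank-th False position is recorded at index rank in pvGp
theorem pvGp_rank : ∀ (l : List Bool) (i k : Nat), l[i]? = some false →
    (l.take i).count false < (pvGp l k).length ∧
    (pvGp l k).getD ((l.take i).count false) 0 = k + i := by
  intro l
  induction l with
  | nil => intro i k h; simp at h
  | cons b bs ih =>
    intro i k h
    cases i with
    | zero =>
      simp at h; subst h
      simp [pvGp]
    | succ i =>
      simp only [List.getElem?_cons_succ] at h
      have := ih i (k + 1) h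
      cases b <;>
        simp_all [pvGp, List.count_cons] <;> omega

-- conversely each recorded position is a False position of that rank
theorem pvGp_sound : ∀ (l : List Bool) (j k : Nat), j < (pvGp l k).length →
    ∃ i, l[i]? = some false ∧ (pvGp l k).getD j 0 = k + i ∧ (l.take i).count false = j := by
  intro l
  induction l with
  | nil => intro j k h; simp [pvGp] at h
  | cons b bs ih =>
    intro j k h
    cases b with
    | true =>
      simp only [pvGp] at h ⊢
      obtain ⟨i, h1, h2, h3⟩ := ih j (k + 1) h
      exact ⟨i + 1, by simpa using h1, by omega, by simpa using h3⟩
    | false =>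
      cases j with
      | zero => exact ⟨0, by simp, by simp [pvGp], by simp⟩
      | succ j =>
        simp only [pvGp, List.length_cons, Nat.succ_lt_succ_iff] at h
        obtain ⟨i, h1, h2, h3⟩ := ih j (k + 1) h
        refine ⟨i + 1, by simpa using h1, ?_, ?_⟩
        · simp only [pvGp, List.getD_cons_succ]
          omega
        · simp [h3]

-- ===== VERDICT (by name: the statement is the Claim_ definition above) =====
theorem new_bool_repr_spec : Claim_equal_new_bool_repr := by
  intro l query _
  show pvLoopA query l 0 = new_bool_repr_alt l query
  unfold new_bool_repr_alt
  have hfp : (PySem.List.enumerate l).filterMap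
      (fun p => if p.2 then none else some p.1.toNat) = pvGp l 0 := by
    simpa using pvFp_eq_gp l 0
  simp only [hfp]
  apply List.ext_getElem?
  intro i
  rw [pvLoopA_getElem?, pvFold_getElem?]
  by_cases hE : (∃ q ∈ query, 0 ≤ q ∧ q < ((pvGp l 0).length : Int) ∧ (pvGp l 0).getD q.toNat 0 = i)
  · -- some queried rank hits position i, so rank-of-i is in query: entry becomes true on both sides
    rw [if_pos hE]
    obtain ⟨q, hq, h0, h1, h2⟩ := hE
    have hjlt : q.toNat < (pvGp l 0).length := by omega
    obtain ⟨i', hi'1, hi'2, hi'3⟩ := pvGp_sound l q.toNat 0 hjlt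
    have hii : i' = i := by omega
    rw [hii] at hi'1 hi'3
    have hrq : (((l.take i).count false : Nat) : Int) = q := by rw [hi'3]; omega
    have hfind : pvFindQ (0 + (((l.take i).count false : Nat) : Int)) query = true := by
      rw [pvFindQ_iff]
      rw [zero_add, hrq]
      exact hq
    have hfind2 : pvFindQ ((((l.take i).count false : Nat) : Int)) query = true := by
      rwa [zero_add] at hfind
    cases l[i]? <;> simp [hfind, hfind2]
  · -- no queried rank hits position i: entry unchanged on both sides
    rw [if_neg hE]
    cases hli : l[i]? with
    | none => simp
    | some b =>
      cases b with
      | true => simp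
      | false =>
        have hfind : pvFindQ (0 + (((l.take i).count false : Nat) : Int)) query = false := by
          by_contra hne
          have ht : pvFindQ (0 + (((l.take i).count false : Nat) : Int)) query = true := by
            cases hx : pvFindQ (0 + (((l.take i).count false : Nat) : Int)) query
            · exact absurd hx hne
            · rfl
          have hmem : ((((l.take i).count false : Nat) : Int)) ∈ query := by
            have := (pvFindQ_iff _ _).mp ht
            rwa [zero_add] at this
          obtain ⟨hlt, hget⟩ := pvGp_rank l i 0 hli
          exact hE ⟨_, hmem, by omega, by omega, by simpa using hget⟩
        have hfind2 : pvFindQ ((((l.take i).count false : Nat) : Int)) query = false := by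
          rwa [zero_add] at hfind
        simp [hfind, hfind2]
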